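-- pv_equiv track=rewrite | github.com/facebookresearch/MultiplexedOCR | multiplexer/utils/languages.py | word_case_score
-- ===== SOURCE A (Python) =====
-- def word_case_score(word):
--     upper_count = 0
--     lower_count = 0
--     for ch in word:
--         if "A" <= ch <= "Z":
--             if lower_count > 0:
--                 # upper comes after lower
--                 return 0
--             upper_count += 1
--         elif "a" <= ch <= "z":
--             if upper_count > 1:
--                 # lower comes after more than 1 upper
--                 return 0
--             lower_count += 1
--         else:
--             # punctuation resets the count
--             upper_count = 0
--             lower_count = 0
--     return 1
-- ===== SOURCE B (Python) =====
-- def word_case_score(word):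
--     # Split into maximal letter runs (any non-letter separates), then accept each
--     # run iff it is all-uppercase or has at most one leading uppercase letter.
--     runs = "".join(ch if ch.isalpha() else " " for ch in word).split()
--     for run in runs:
--         if not (run.isupper() or run[1:] == run[1:].lower()):
--             return 0
--     return 1
-- ===== Notes on version B (the rewrite author's own statement) =====
-- stated objective: idiomatic
-- what changed: Replaces the character-by-character counter automaton (upper/lower counts with mid-scan early returns and resets) by splitting the word into maximal letter runs and testing each whole run against the accepted pattern (all-uppercase, or at most one leading uppercase) with str.isupper/str.lower.
import Mathlib
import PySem

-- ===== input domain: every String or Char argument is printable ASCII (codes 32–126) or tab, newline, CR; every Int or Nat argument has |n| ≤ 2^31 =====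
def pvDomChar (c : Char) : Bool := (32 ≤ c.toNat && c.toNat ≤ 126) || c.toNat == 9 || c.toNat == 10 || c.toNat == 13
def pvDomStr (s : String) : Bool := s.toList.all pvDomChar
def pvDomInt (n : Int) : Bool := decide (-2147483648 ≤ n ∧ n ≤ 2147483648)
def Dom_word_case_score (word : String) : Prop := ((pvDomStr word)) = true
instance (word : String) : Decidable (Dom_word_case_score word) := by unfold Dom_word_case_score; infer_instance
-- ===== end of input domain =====

-- B replaces A's character-level counter automaton by splitting the word into maximal
-- letter runs and testing each whole run's case pattern (objective: idiomatic).

-- ===== PORT A =====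
-- the for-loop with early returns, carrying upper_count / lower_count
def wcsGoA : List Char → Int → Int → Int
  | [], _, _ => 1
  | ch :: rest, upper_count, lower_count =>
    if 'A' ≤ ch ∧ ch ≤ 'Z' then
      if lower_count > 0 then 0 else wcsGoA rest (upper_count + 1) lower_count
    else if 'a' ≤ ch ∧ ch ≤ 'z' then
      if upper_count > 1 then 0 else wcsGoA rest upper_count (lower_count + 1)
    else
      wcsGoA rest 0 0

def word_case_score (word : String) : Int := wcsGoA word.toList 0 0

-- ===== PORT B =====
-- run.isupper() (hand port, exact on ASCII: some cased char and no lowercase char)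
-- or run[1:] == run[1:].lower()
def wcsOkRun (r : List Char) : Bool :=
  (r.any PySem.Chars.isalpha && r.all (fun c => !PySem.Chars.islower c))
  || (PySem.List.slice r (some 1) none == PySem.Chars.lower (PySem.List.slice r (some 1) none))

-- the for-loop over runs with the early return
def wcsGoB : List (List Char) → Int
  | [] => 1
  | run :: rest => if !(wcsOkRun run) then 0 else wcsGoB rest

def word_case_score_alt (word : String) : Int :=
  -- "".join(ch if ch.isalpha() else " " for ch in word) is the character map below
  wcsGoB (PySem.Chars.split₀
    (word.toList.map (fun ch => if PySem.Chars.isalpha ch then ch else ' ')))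

-- ===== PRECONDITION & SPEC =====
def Spec_word_case_score (word : String) (out : Int) : Prop := out = word_case_score_alt word
instance (word : String) (out : Int) : Decidable (Spec_word_case_score word out) := by unfold Spec_word_case_score; infer_instance

-- ===== CLAIM (what is proved, stated in full; the proofs are below) =====
def Claim_equal_word_case_score : Prop := ∀ (word : String), Dom_word_case_score word → Spec_word_case_score word (word_case_score word)

-- ===== LEMMAS AND PROOFS =====

-- character facts
lemma wcs_isupper_iff (c : Char) : PySem.Chars.isupper c = true ↔ ('A' ≤ c ∧ c ≤ 'Z') := by
  simp [PySem.Chars.isupper]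

lemma wcs_islower_iff (c : Char) : PySem.Chars.islower c = true ↔ ('a' ≤ c ∧ c ≤ 'z') := by
  simp [PySem.Chars.islower]

lemma wcs_upper_bounds {c : Char} (h : PySem.Chars.isupper c = true) :
    65 ≤ c.toNat ∧ c.toNat ≤ 90 := by
  simpa only [PySem.Chars.isupper, Bool.and_eq_true, decide_eq_true_eq] using h

lemma wcs_lower_bounds {c : Char} (h : PySem.Chars.islower c = true) :
    97 ≤ c.toNat ∧ c.toNat ≤ 122 := by
  simpa only [PySem.Chars.islower, Bool.and_eq_true, decide_eq_true_eq] using h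

lemma wcs_upper_not_lower {c : Char} (h : PySem.Chars.isupper c = true) :
    PySem.Chars.islower c = false := by
  obtain ⟨h1, h2⟩ := wcs_upper_bounds h
  rw [PySem.Chars.islower, Bool.and_eq_false_iff]
  left; simp only [decide_eq_false_iff_not]
  intro hc
  have h3 : (97:Nat) ≤ c.toNat := hc
  omega

lemma wcs_lower_not_upper {c : Char} (h : PySem.Chars.islower c = true) :
    PySem.Chars.isupper c = false := by
  obtain ⟨h1, h2⟩ := wcs_lower_bounds h
  rw [PySem.Chars.isupper, Bool.and_eq_false_iff]
  right; simp only [decide_eq_false_iff_not]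
  intro hc
  have h3 : c.toNat ≤ 90 := hc
  omega

lemma wcs_upper_alpha {c : Char} (h : PySem.Chars.isupper c = true) :
    PySem.Chars.isalpha c = true := by
  simp [PySem.Chars.isalpha, h]

lemma wcs_lower_alpha {c : Char} (h : PySem.Chars.islower c = true) :
    PySem.Chars.isalpha c = true := by
  simp [PySem.Chars.isalpha, h]

lemma wcs_lowerChar_fix {c : Char} (h : PySem.Chars.isupper c = false) :
    PySem.Chars.lowerChar c = c := by
  simp [PySem.Chars.lowerChar, h]

lemma wcs_lowerChar_ne {c : Char} (h : PySem.Chars.isupper c = true) :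
    PySem.Chars.lowerChar c ≠ c := by
  obtain ⟨h1, h2⟩ := wcs_upper_bounds h
  intro heq
  have hv : (PySem.Chars.lowerChar c).toNat = c.toNat + 32 := by
    simp only [PySem.Chars.lowerChar, h, if_true]
    rw [Char.toNat_ofNat, if_pos (Or.inl (by omega))]
  rw [heq] at hv
  omega

lemma wcs_alpha_not_space {c : Char} (h : PySem.Chars.isalpha c = true) :
    PySem.Chars.isspace c = false := by
  rcases (by simpa only [PySem.Chars.isalpha, Bool.or_eq_true] using h) with hu | hl
  · obtain ⟨h1, h2⟩ := wcs_upper_bounds hu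
    simp only [PySem.Chars.isspace]
    simp only [Bool.or_eq_false_iff, Bool.and_eq_false_iff, decide_eq_false_iff_not]
    omega
  · obtain ⟨h1, h2⟩ := wcs_lower_bounds hl
    simp only [PySem.Chars.isspace]
    simp only [Bool.or_eq_false_iff, Bool.and_eq_false_iff, decide_eq_false_iff_not]
    omega

-- okRun characterisation on all-letter runs
lemma wcs_ok_of_all_upper {r : List Char} (hne : r ≠ [])
    (hU : ∀ x ∈ r, PySem.Chars.isupper x = true) : wcsOkRun r = true := by
  rw [wcsOkRun, Bool.or_eq_true]; left
  rw [Bool.and_eq_true]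
  constructor
  · obtain ⟨c, cs, rfl⟩ := List.exists_cons_of_ne_nil hne
    simp [wcs_upper_alpha (hU c (by simp))]
  · rw [List.all_eq_true]
    intro c hc
    simp [wcs_upper_not_lower (hU c hc)]

lemma wcs_ok_of_tail_lower {r : List Char}
    (hL : ∀ x ∈ r.tail, PySem.Chars.islower x = true) : wcsOkRun r = true := by
  rw [wcsOkRun, Bool.or_eq_true]; right
  rw [PySem.List.slice_from_one, beq_iff_eq, PySem.Chars.lower]
  exact ((List.map_congr_left
    (fun x hx => wcs_lowerChar_fix (wcs_lower_not_upper (hL x hx)))).trans (List.map_id _)).symm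

lemma wcs_ok_false {r : List Char}
    (hlow : ∃ x ∈ r, PySem.Chars.islower x = true)
    (hup : ∃ x ∈ r.tail, PySem.Chars.isupper x = true) : wcsOkRun r = false := by
  rw [wcsOkRun, Bool.or_eq_false_iff]
  constructor
  · rw [Bool.and_eq_false_iff]; right
    rw [List.all_eq_false]
    obtain ⟨x, hx, hxl⟩ := hlow
    exact ⟨x, hx, by simp [hxl]⟩
  · rw [PySem.List.slice_from_one, beq_eq_false_iff_ne]
    intro heq
    obtain ⟨c, hc, hcu⟩ := hup
    obtain ⟨i, hi, rfl⟩ := List.mem_iff_getElem.mp hc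
    have := congrArg (fun l => l[i]?) heq
    simp only [PySem.Chars.lower, List.getElem?_map, List.getElem?_eq_getElem hi] at this
    exact wcs_lowerChar_ne hcu (by simpa using this.symm)

-- the alive run shape is accepted
lemma wcs_ok_alive (L U : List Char)
    (hL : ∀ x ∈ L, PySem.Chars.islower x = true)
    (hU : ∀ x ∈ U, PySem.Chars.isupper x = true)
    (hlim : L ≠ [] → U.length ≤ 1)
    (hne : L ++ U ≠ []) : wcsOkRun (U.reverse ++ L.reverse) = true := by
  rw [← List.reverse_append]
  by_cases hl : L = []
  · subst hl
    apply wcs_ok_of_all_upper (by simpa using hne)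
    intro x hx
    exact hU x (by simpa using hx)
  · apply wcs_ok_of_tail_lower
    intro x hx
    have hU1 : U.length ≤ 1 := hlim hl
    rcases U with _ | ⟨u, U'⟩
    · simp only [List.append_nil] at hx
      exact hL x (List.mem_reverse.mp (List.tail_subset _ hx))
    · rcases U' with _ | ⟨v, U''⟩
      · rw [List.reverse_append, List.reverse_singleton, List.singleton_append,
          List.tail_cons] at hx
        exact hL x (List.mem_reverse.mp hx)
      · simp at hU1

-- if-on-isEmpty helpers
lemma wcs_if_isEmpty_neg {α β : Type} (l : List α) (h : l ≠ []) (a b : β) :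
    (if l.isEmpty = true then a else b) = b := by
  rw [if_neg]
  simp [List.isEmpty_eq_false_iff.mpr h]

lemma wcs_if_isEmpty_pos {α β : Type} (l : List α) (h : l = []) (a b : β) :
    (if l.isEmpty = true then a else b) = a := by
  subst h; rfl

-- split₀.go accumulator lemma
lemma wcs_go_acc (cs : List Char) (cur : List Char) (acc : List (List Char)) :
    PySem.Chars.split₀.go cs cur acc = acc.reverse ++ PySem.Chars.split₀.go cs cur [] := by
  induction cs generalizing cur acc with
  | nil =>
    by_cases h : cur.isEmpty <;> simp [PySem.Chars.split₀.go, h]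
  | cons c rest ih =>
    by_cases h : PySem.Chars.isspace c
    · by_cases h2 : cur.isEmpty
      · simp only [PySem.Chars.split₀.go, h, h2, if_true]
        exact ih _ _
      · simp only [PySem.Chars.split₀.go, h, h2, if_true, Bool.false_eq_true, if_false]
        rw [ih [] (cur.reverse :: acc), ih [] [cur.reverse]]
        simp
    · simp only [PySem.Chars.split₀.go, h, Bool.false_eq_true, if_false]
      exact ih _ _

-- dead-run lemma: once the current (reversed) run prefix is poisoned, B yields 0
lemma wcs_dead (cs : List Char) (cur : List Char)
    (halpha : ∀ x ∈ cur, PySem.Chars.isalpha x = true)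
    (hlow : ∃ x ∈ cur, PySem.Chars.islower x = true)
    (hup : ∃ x ∈ cur.dropLast, PySem.Chars.isupper x = true) :
    wcsGoB (PySem.Chars.split₀.go
      (cs.map (fun ch => if PySem.Chars.isalpha ch then ch else ' ')) cur []) = 0 := by
  have hne : cur ≠ [] := by
    obtain ⟨x, hx, _⟩ := hlow
    exact List.ne_nil_of_mem hx
  have hok : wcsOkRun cur.reverse = false := by
    apply wcs_ok_false
    · obtain ⟨x, hx, hxl⟩ := hlow
      exact ⟨x, by simpa using hx, hxl⟩
    · obtain ⟨x, hx, hxu⟩ := hup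
      refine ⟨x, ?_, hxu⟩
      rw [← List.drop_one, List.drop_one, List.tail_reverse]
      exact List.mem_reverse.mpr hx
  induction cs generalizing cur with
  | nil =>
    simp only [List.map_nil, PySem.Chars.split₀.go]
    rw [wcs_if_isEmpty_neg _ hne]
    simp [wcsGoB, hok]
  | cons c rest ih =>
    simp only [List.map_cons]
    by_cases hc : PySem.Chars.isalpha c = true
    · rw [if_pos hc]
      simp only [PySem.Chars.split₀.go, wcs_alpha_not_space hc, Bool.false_eq_true, if_false]
      apply ih (c :: cur)
      · intro x hx
        rcases List.mem_cons.mp hx with rfl | hx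
        · exact hc
        · exact halpha x hx
      · obtain ⟨x, hx, hxl⟩ := hlow
        exact ⟨x, List.mem_cons_of_mem _ hx, hxl⟩
      · obtain ⟨x, hx, hxu⟩ := hup
        rw [List.dropLast_cons_of_ne_nil hne]
        exact ⟨x, List.mem_cons_of_mem _ hx, hxu⟩
      · simp
      · apply wcs_ok_false
        · obtain ⟨x, hx, hxl⟩ := hlow
          exact ⟨x, by simp [hx], hxl⟩
        · obtain ⟨x, hx, hxu⟩ := hup
          refine ⟨x, ?_, hxu⟩
          rw [← List.drop_one, List.drop_one, List.tail_reverse,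
            List.dropLast_cons_of_ne_nil hne]
          simp only [List.mem_reverse, List.mem_cons]
          right; exact hx
    · rw [if_neg hc]
      simp only [PySem.Chars.split₀.go, (by decide : PySem.Chars.isspace ' ' = true), if_true]
      rw [wcs_if_isEmpty_neg _ hne, wcs_go_acc]
      simp [wcsGoB, hok]

-- main alive invariant: A's counters describe the current run prefix L ++ U (reversed)
lemma wcs_main (cs : List Char) (L U : List Char)
    (hL : ∀ x ∈ L, PySem.Chars.islower x = true)
    (hU : ∀ x ∈ U, PySem.Chars.isupper x = true)
    (hlim : L ≠ [] → U.length ≤ 1) :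
    wcsGoA cs ((U.length : Int)) ((L.length : Int)) =
      wcsGoB (PySem.Chars.split₀.go
        (cs.map (fun ch => if PySem.Chars.isalpha ch then ch else ' ')) (L ++ U) []) := by
  induction cs generalizing L U with
  | nil =>
    simp only [List.map_nil, PySem.Chars.split₀.go, wcsGoA]
    by_cases hne : L ++ U = []
    · rw [wcs_if_isEmpty_pos _ hne]; simp [wcsGoB]
    · rw [wcs_if_isEmpty_neg _ hne]
      simp only [List.reverse_nil, List.reverse_cons, List.nil_append]
      simp [wcsGoB, wcs_ok_alive L U hL hU hlim hne]
  | cons ch rest ih =>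
    simp only [List.map_cons, wcsGoA]
    by_cases hu : 'A' ≤ ch ∧ ch ≤ 'Z'
    · have hchu : PySem.Chars.isupper ch = true := (wcs_isupper_iff ch).mpr hu
      rw [if_pos hu, if_pos (wcs_upper_alpha hchu)]
      simp only [PySem.Chars.split₀.go, wcs_alpha_not_space (wcs_upper_alpha hchu),
        Bool.false_eq_true, if_false]
      by_cases hl : L = []
      · subst hl
        rw [if_neg (by simp)]
        have := ih [] (ch :: U) (by simp) (by
          intro x hx
          rcases List.mem_cons.mp hx with rfl | hx
          · exact hchu
          · exact hU x hx) (by simp)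
        simpa [Int.add_comm] using this
      · rw [if_pos (by
          have : 0 < L.length := List.length_pos_of_ne_nil hl
          omega)]
        symm
        apply wcs_dead rest (ch :: (L ++ U))
        · intro x hx
          rcases List.mem_cons.mp hx with rfl | hx
          · exact wcs_upper_alpha hchu
          · rcases List.mem_append.mp hx with hx | hx
            · exact wcs_lower_alpha (hL x hx)
            · exact wcs_upper_alpha (hU x hx)
        · obtain ⟨a, ha⟩ := List.exists_mem_of_ne_nil L hl
          exact ⟨a, by simp [List.mem_append.mpr (Or.inl ha)], hL a ha⟩
        · rw [List.dropLast_cons_of_ne_nil (by simp [hl])]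
          exact ⟨ch, by simp, hchu⟩
    · by_cases hlo : 'a' ≤ ch ∧ ch ≤ 'z'
      · have hchl : PySem.Chars.islower ch = true := (wcs_islower_iff ch).mpr hlo
        rw [if_neg hu, if_pos hlo, if_pos (wcs_lower_alpha hchl)]
        simp only [PySem.Chars.split₀.go, wcs_alpha_not_space (wcs_lower_alpha hchl),
          Bool.false_eq_true, if_false]
        by_cases hbig : U.length ≥ 2
        · rw [if_pos (by omega)]
          symm
          apply wcs_dead rest (ch :: (L ++ U))
          · intro x hx
            rcases List.mem_cons.mp hx with rfl | hx
            · exact wcs_lower_alpha hchl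
            · rcases List.mem_append.mp hx with hx | hx
              · exact wcs_lower_alpha (hL x hx)
              · exact wcs_upper_alpha (hU x hx)
          · exact ⟨ch, by simp, hchl⟩
          · -- U has two uppercase letters; at least one survives dropLast
            rw [List.dropLast_cons_of_ne_nil (by
              intro hcon
              rcases List.append_eq_nil_iff.mp hcon with ⟨_, hUnil⟩
              rw [hUnil] at hbig; simp at hbig)]
            have hUne : U ≠ [] := by
              intro hUnil; rw [hUnil] at hbig; simp at hbig
            rw [List.dropLast_append, if_neg (by simpa using hUne)]
            have hdne : U.dropLast ≠ [] := by
              have : U.dropLast.length = U.length - 1 := List.length_dropLast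
              intro hcon; rw [hcon] at this; simp at this; omega
            obtain ⟨a, ha⟩ := List.exists_mem_of_ne_nil _ hdne
            exact ⟨a, by simp [ha], hU a (List.dropLast_subset _ ha)⟩
        · rw [if_neg (by omega)]
          have := ih (ch :: L) U (by
            intro x hx
            rcases List.mem_cons.mp hx with rfl | hx
            · exact hchl
            · exact hL x hx) hU (by intro _; omega)
          simpa [Int.add_comm] using this
      · have hcha : PySem.Chars.isalpha ch = false := by
          simp only [PySem.Chars.isalpha, Bool.or_eq_false_iff]
          constructor
          · rw [← Bool.not_eq_true, wcs_isupper_iff]; exact hu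
          · rw [← Bool.not_eq_true, wcs_islower_iff]; exact hlo
        rw [if_neg hu, if_neg hlo, if_neg (by simp [hcha])]
        simp only [PySem.Chars.split₀.go, (by decide : PySem.Chars.isspace ' ' = true), if_true]
        by_cases hne : L ++ U = []
        · rw [wcs_if_isEmpty_pos _ hne]
          have := ih [] [] (by simp) (by simp) (by simp)
          simpa using this
        · rw [wcs_if_isEmpty_neg _ hne, wcs_go_acc]
          simp only [List.reverse_cons, List.reverse_nil, List.nil_append, List.cons_append]
          rw [show wcsGoB ((L ++ U).reverse :: PySem.Chars.split₀.go
              (rest.map (fun ch => if PySem.Chars.isalpha ch then ch else ' ')) [] []) =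
            wcsGoB (PySem.Chars.split₀.go
              (rest.map (fun ch => if PySem.Chars.isalpha ch then ch else ' ')) [] []) by
            simp [wcsGoB, wcs_ok_alive L U hL hU hlim hne]]
          have := ih [] [] (by simp) (by simp) (by simp)
          simpa using this

-- ===== VERDICT (by name: the statement is the Claim_ definition above) =====
theorem word_case_score_spec : Claim_equal_word_case_score := by
  intro word _
  show word_case_score word = word_case_score_alt word
  have := wcs_main word.toList [] [] (by simp) (by simp) (by simp)
  simpa [word_case_score, word_case_score_alt, PySem.Chars.split₀] using this
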